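-- pv_equiv track=rewrite | github.com/marciof/tools | puzzles/student_attendance.py | is_in_trouble
-- ===== SOURCE A (Python) =====
-- LATE = 'l'
--
-- ABSENT = 'a'
--
-- def is_in_trouble(attendance):
--     """
--     Time: O(n)
--     Space: O(1)
--     """
--
--     num_absent = 0
--     num_late = 0
--
--     for record in attendance:
--         if record == ABSENT:
--             num_absent += 1
--
--             if num_absent == 2:
--                 return True
--         elif record == LATE:
--             num_late += 1
--
--             if num_late == 3:
--                 return True
--
--             continue
--
--         num_late = 0
--
--     return False
-- ===== SOURCE B (Python) =====
-- LATE = 'l'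
--
-- ABSENT = 'a'
--
-- def is_in_trouble(attendance):
--     return (attendance.count(ABSENT) >= 2
--             or any(x == y == z == LATE
--                    for x, y, z in zip(attendance, attendance[1:], attendance[2:])))
-- ===== Notes on version B (the rewrite author's own statement) =====
-- stated objective: simpler
-- what changed: Replaces A's single stateful scan with two counters and early returns by a declarative expression: list.count for the total-absences check plus a zip-of-three-shifted-copies window scan for three consecutive lates.
import Mathlib
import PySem

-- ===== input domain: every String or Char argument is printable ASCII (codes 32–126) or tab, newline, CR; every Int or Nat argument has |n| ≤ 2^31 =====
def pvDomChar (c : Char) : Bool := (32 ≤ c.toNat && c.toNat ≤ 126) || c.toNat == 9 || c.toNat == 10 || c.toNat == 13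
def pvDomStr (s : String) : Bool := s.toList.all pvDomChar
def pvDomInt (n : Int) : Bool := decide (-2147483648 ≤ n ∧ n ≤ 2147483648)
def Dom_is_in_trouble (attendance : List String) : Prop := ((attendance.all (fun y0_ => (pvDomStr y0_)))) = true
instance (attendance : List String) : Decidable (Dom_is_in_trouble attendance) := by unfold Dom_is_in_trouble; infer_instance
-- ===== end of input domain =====

-- B replaces A's stateful counter loop by count-based and window-based declarative checks (simpler decomposition, same O(n)).

-- ===== PORT A =====
-- the for-loop of A with its two counters, early returns and the 'continue' that skips the reset
def isInTroubleLoop : List String → Int → Int → Bool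
  | [], _, _ => false
  | record :: rest, num_absent, num_late =>
      if record == "a" then
        if num_absent + 1 == 2 then true
        else isInTroubleLoop rest (num_absent + 1) 0
      else if record == "l" then
        if num_late + 1 == 3 then true
        else isInTroubleLoop rest num_absent (num_late + 1)
      else isInTroubleLoop rest num_absent 0

def is_in_trouble (attendance : List String) : Bool :=
  isInTroubleLoop attendance 0 0

-- ===== PORT B =====
def is_in_trouble_alt (attendance : List String) : Bool :=
  decide (2 ≤ (PySem.List.count attendance "a" : Int)) ||
  ((attendance.zip ((PySem.List.slice attendance (some 1) none).zip
                    (PySem.List.slice attendance (some 2) none))).any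
    (fun t => t.1 == t.2.1 && t.2.1 == t.2.2 && t.2.2 == "l"))

-- ===== PRECONDITION & SPEC =====
def Spec_is_in_trouble (attendance : List String) (out : Bool) : Prop := out = is_in_trouble_alt attendance
instance (attendance : List String) (out : Bool) : Decidable (Spec_is_in_trouble attendance out) := by unfold Spec_is_in_trouble; infer_instance

-- ===== CLAIM (what is proved, stated in full; the proofs are below) =====
def Claim_equal_is_in_trouble : Prop := ∀ (attendance : List String), Dom_is_in_trouble attendance → Spec_is_in_trouble attendance (is_in_trouble attendance)

-- ===== LEMMAS AND PROOFS =====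

-- 'there are three consecutive "l" somewhere'
def hasT : List String → Bool
  | "l" :: "l" :: "l" :: _ => true
  | _ :: rest => hasT rest
  | [] => false

-- streak tracker: nl lates already seen immediately before xs
def hasTriple (nl : Int) : List String → Bool
  | [] => false
  | x :: rest => if x == "l" then (if nl == 2 then true else hasTriple (nl + 1) rest)
                 else hasTriple 0 rest

theorem hasT_cons_ne (x : String) (rest : List String) (hx : x ≠ "l") :
    hasT (x :: rest) = hasT rest := by
  cases rest with
  | nil => simp [hasT, hx]
  | cons y t =>
    cases t with
    | nil => simp [hasT, hx]
    | cons z u => by_cases hy : y = "l" <;> by_cases hz : z = "l" <;> simp [hasT, hx, hy, hz]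

theorem hasT_cons_l (rest : List String) :
    hasT ("l" :: rest) =
      ((match rest with | "l" :: "l" :: _ => true | _ => false) || hasT rest) := by
  match rest with
  | [] => simp [hasT]
  | [y] => by_cases hy : y = "l" <;> simp [hasT, hy]
  | y :: z :: t =>
    by_cases hy : y = "l" <;> by_cases hz : z = "l" <;> simp [hasT, hy, hz]

def lead1 : List String → Bool
  | "l" :: _ => true
  | _ => false

def lead2 : List String → Bool
  | "l" :: "l" :: _ => true
  | _ => false

theorem hasT_cons_l' (rest : List String) :
    hasT ("l" :: rest) = (lead2 rest || hasT rest) := by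
  rw [hasT_cons_l]
  match rest with
  | [] => simp [lead2]
  | [y] => by_cases hy : y = "l" <;> simp [lead2, hy]
  | y :: z :: t => by_cases hy : y = "l" <;> by_cases hz : z = "l" <;> simp [lead2, hy, hz]

theorem lead2_cons_l (rest : List String) : lead2 ("l" :: rest) = lead1 rest := by
  cases rest with
  | nil => simp [lead1, lead2]
  | cons y t => by_cases hy : y = "l" <;> simp [lead1, lead2, hy]

theorem lead2_imp_lead1 (xs : List String) (h : lead2 xs = true) : lead1 xs = true := by
  match xs with
  | [] => simp [lead2] at h
  | [y] => by_cases hy : y = "l" <;> simp [lead1, lead2, hy] at h ⊢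
  | y :: z :: t =>
    by_cases hy : y = "l" <;> simp [lead1, lead2, hy] at h ⊢

theorem hasTriple_eq (xs : List String) :
    hasTriple 0 xs = hasT xs ∧
    hasTriple 1 xs = (lead2 xs || hasT xs) ∧
    hasTriple 2 xs = (lead1 xs || hasT xs) := by
  induction xs with
  | nil => simp [hasTriple, hasT, lead1, lead2]
  | cons x rest ih =>
    obtain ⟨ih0, ih1, ih2⟩ := ih
    by_cases hx : x = "l"
    · subst hx
      refine ⟨?_, ?_, ?_⟩
      · simp only [hasTriple, if_pos rfl]
        norm_num
        rw [ih1, hasT_cons_l']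
      · have hL : hasTriple 1 ("l" :: rest) = hasTriple 2 rest := by
          simp [hasTriple]
        rw [hL, ih2, hasT_cons_l', lead2_cons_l]
        cases h2 : lead2 rest
        · simp [h2]
        · simp [h2, lead2_imp_lead1 rest h2]
      · simp [hasTriple, lead1]
    · have h1 : hasT (x :: rest) = hasT rest := hasT_cons_ne x rest hx
      have h2 : lead2 (x :: rest) = false := by
        cases rest with
        | nil => simp [lead2, hx]
        | cons y t => by_cases hy : y = "l" <;> simp [lead2, hx, hy]
      have h3 : lead1 (x :: rest) = false := by simp [lead1, hx]
      simp only [hasTriple, hx]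
      simp [hx, h1, h2, h3, ih0]

-- A's loop, characterised: total absences vs 2, plus the late-streak tracker
theorem loop_eq (xs : List String) (na nl : Int)
    (hna : na = 0 ∨ na = 1) (hnl : nl = 0 ∨ nl = 1 ∨ nl = 2) :
    isInTroubleLoop xs na nl =
      (decide (2 ≤ na + (xs.count "a" : Int)) || hasTriple nl xs) := by
  induction xs generalizing na nl with
  | nil =>
    simp [isInTroubleLoop, hasTriple]
    omega
  | cons x rest ih =>
    by_cases hx : x = "a"
    · subst hx
      have hc : (("a" :: rest).count "a" : Int) = rest.count "a" + 1 := by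
        simp [List.count_cons]
      simp only [isInTroubleLoop, if_pos (by simp : ("a" : String) == "a")]
      have hT : hasTriple nl ("a" :: rest) = hasTriple 0 rest := by
        simp [hasTriple]
      rcases hna with h | h
      · subst h
        have : ¬ ((0 : Int) + 1 == 2) = true := by decide
        rw [if_neg this, (by norm_num : (0:Int) + 1 = 1),
            ih 1 0 (Or.inr rfl) (Or.inl rfl), hT, hc]
        congr 1
        simp; constructor <;> intro <;> omega
      · subst h
        rw [if_pos (by decide), hc]
        have : (2 : Int) ≤ 1 + (rest.count "a" + 1) := by
          have : (0 : Int) ≤ rest.count "a" := by positivity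
          omega
        simp [this]
    · by_cases hl : x = "l"
      · subst hl
        have hc : (("l" :: rest).count "a" : Int) = rest.count "a" := by
          simp [List.count_cons]
        simp only [isInTroubleLoop]
        rw [if_neg (by simp : ¬ (("l" : String) == "a") = true),
            if_pos (by simp : ("l" : String) == "l")]
        have hT : hasTriple nl ("l" :: rest) =
            (if nl == 2 then true else hasTriple (nl + 1) rest) := by
          simp [hasTriple]
        rcases hnl with h | h | h
        · subst h
          rw [if_neg (by decide), (by norm_num : (0:Int) + 1 = 1),
              ih na 1 hna (Or.inr (Or.inl rfl)), hT, hc]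
          simp
        · subst h
          rw [if_neg (by decide), (by norm_num : (1:Int) + 1 = 2),
              ih na 2 hna (Or.inr (Or.inr rfl)), hT, hc]
          simp
        · subst h
          rw [if_pos (by decide), hT, hc]
          simp
      · have hc : ((x :: rest).count "a" : Int) = rest.count "a" := by
          simp [List.count_cons, hx]
        simp only [isInTroubleLoop]
        rw [if_neg (by simp [hx]), if_neg (by simp [hl]),
            ih na 0 hna (Or.inl rfl), hc]
        congr 1
        simp [hasTriple, hl]

-- B's window scan equals hasT
theorem zipAny_eq (xs : List String) :
    ((xs.zip ((xs.tail).zip (xs.tail.tail))).any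
      (fun t => t.1 == t.2.1 && t.2.1 == t.2.2 && t.2.2 == "l")) = hasT xs := by
  induction xs with
  | nil => simp [hasT]
  | cons x rest ih =>
    cases rest with
    | nil => simp [hasT]
    | cons y t =>
      cases t with
      | nil =>
        by_cases hx : x = "l" <;> by_cases hy : y = "l" <;>
          simp [hasT, hx, hy, List.zip, List.any]
      | cons z u =>
        have step : ((x :: y :: z :: u).zip (((x :: y :: z :: u).tail).zip ((x :: y :: z :: u).tail.tail))).any
              (fun t => t.1 == t.2.1 && t.2.1 == t.2.2 && t.2.2 == "l")
            = ((x == y && y == z && z == "l") ||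
               ((y :: z :: u).zip (((y :: z :: u).tail).zip ((y :: z :: u).tail.tail))).any
                 (fun t => t.1 == t.2.1 && t.2.1 == t.2.2 && t.2.2 == "l")) := by
          simp [List.zip]
        rw [step, ih]
        by_cases hx : x = "l"
        · subst hx
          rw [hasT_cons_l']
          by_cases hy : y = "l"
          · subst hy
            by_cases hz : z = "l"
            · subst hz; simp [lead2]
            · simp [lead2, hz]
          · simp [lead2, hy]
            intro h; exact absurd h.symm hy
        · rw [hasT_cons_ne x (y :: z :: u) hx]
          simp [hx]
          intro h1 h2 h3; exact absurd (h1.trans (h2.trans h3)) hx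

-- ===== VERDICT (by name: the statement is the Claim_ definition above) =====
theorem is_in_trouble_spec : Claim_equal_is_in_trouble := by
  intro attendance _
  unfold Spec_is_in_trouble is_in_trouble is_in_trouble_alt
  rw [loop_eq attendance 0 0 (Or.inl rfl) (Or.inl rfl)]
  rw [PySem.List.slice_from_one]
  rw [(by norm_num : (2 : Int) = ((2 : Nat) : Int)), PySem.List.slice_from_natCast]
  have hd : attendance.drop 2 = attendance.tail.tail := by
    cases attendance with
    | nil => rfl
    | cons a t => cases t <;> simp
  rw [hd, zipAny_eq, (hasTriple_eq attendance).1, PySem.List.count_eq]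
  simp
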